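-- pv_equiv track=rewrite | github.com/kylindreagan/Programming-Team | kattis/JuniorYear/awkwardparty.py | find_awkwardness
-- ===== SOURCE A (Python) =====
-- def find_awkwardness(people_list):
--     language_positions = {}
--
--     # Group people by language with their indices
--     for index, language in enumerate(people_list):
--         if language not in language_positions:
--             language_positions[language] = []
--         language_positions[language].append(index)
--
--     min_distance = float('inf')
--     for positions in language_positions.values():
--         if len(positions) > 1:  # Only consider languages spoken by more than one person
--             for i in range(1, len(positions)):
--                 distance = positions[i] - positions[i - 1]
--                 min_distance = min(min_distance, distance)
--
--     return min_distance if min_distance != float('inf') else len(people_list)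
-- ===== SOURCE B (Python) =====
-- def find_awkwardness(people_list):
--     last_seen = {}
--     best = None
--     for index, language in enumerate(people_list):
--         if language in last_seen:
--             gap = index - last_seen[language]
--             if best is None or gap < best:
--                 best = gap
--         last_seen[language] = index
--     return best if best is not None else len(people_list)
-- ===== Notes on version B (the rewrite author's own statement) =====
-- stated objective: simpler
-- what changed: Replaces the group-by-language dict of position lists plus a second nested scan over every group's consecutive pairs with a single online pass that keeps only each language's last index and a running minimum gap.
import Mathlib
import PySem

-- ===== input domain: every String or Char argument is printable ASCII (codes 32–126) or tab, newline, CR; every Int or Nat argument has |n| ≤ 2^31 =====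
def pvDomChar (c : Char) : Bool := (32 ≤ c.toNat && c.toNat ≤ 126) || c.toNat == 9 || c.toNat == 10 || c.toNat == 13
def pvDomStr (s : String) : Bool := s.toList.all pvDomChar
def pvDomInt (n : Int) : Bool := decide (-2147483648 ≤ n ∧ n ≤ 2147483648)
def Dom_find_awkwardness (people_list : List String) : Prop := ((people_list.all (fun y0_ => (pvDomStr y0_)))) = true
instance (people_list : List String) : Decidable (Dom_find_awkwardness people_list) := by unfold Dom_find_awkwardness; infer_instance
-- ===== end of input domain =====

-- B replaces A's group-by-language dict of index lists + nested gap scan by one online pass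
-- keeping each language's last index and a running minimum (objective: simpler; same O(n) cost).

-- ===== PORT A =====
-- float('inf') is modelled as `none` (it is only ever a sentinel that min replaces);
-- the two 'if language not in d: d[language] = []' + 'd[language].append(index)' steps are
-- exactly d[language] = d.get(language, []) + [index], ported as Dict.modify (exact);
-- positions[i] is always in range here, so pyGet? is defused with .getD 0 (never used).
def find_awkwardness (people_list : List String) : Int :=
  let language_positions : PySem.Dict String (List Int) :=
    (PySem.List.enumerate people_list).foldl
      (fun d p => d.modify p.2 [] (· ++ [p.1])) PySem.Dict.empty
  let min_distance : Option Int :=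
    language_positions.values.foldl
      (fun md positions =>
        if 1 < positions.length then
          (PySem.List.pyRange 1 (positions.length : Int)).foldl
            (fun md i =>
              let distance := (PySem.List.pyGet? positions i).getD 0 -
                              (PySem.List.pyGet? positions (i - 1)).getD 0
              some (match md with | none => distance | some m => min m distance)) md
        else md) none
  match min_distance with
  | some m => m
  | none => (people_list.length : Int)

-- ===== PORT B =====
-- `best = None` is `none`; state = (last_seen, best).
def find_awkwardness_alt (people_list : List String) : Int :=
  let st :=
    (PySem.List.enumerate people_list).foldl
      (fun (st : PySem.Dict String Int × Option Int) p =>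
        let best :=
          match st.1.get? p.2 with
          | some j =>
            let gap := p.1 - j
            some (match st.2 with | none => gap | some b => if gap < b then gap else b)
          | none => st.2
        (st.1.insert p.2 p.1, best))
      (PySem.Dict.empty, none)
  match st.2 with
  | some b => b
  | none => (people_list.length : Int)

-- ===== PRECONDITION & SPEC =====
def Spec_find_awkwardness (people_list : List String) (out : Int) : Prop := out = find_awkwardness_alt people_list
instance (people_list : List String) (out : Int) : Decidable (Spec_find_awkwardness people_list out) := by unfold Spec_find_awkwardness; infer_instance

-- ===== CLAIM (what is proved, stated in full; the proofs are below) =====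
def Claim_equal_find_awkwardness : Prop := ∀ (people_list : List String), Dom_find_awkwardness people_list → Spec_find_awkwardness people_list (find_awkwardness people_list)

-- ===== LEMMAS AND PROOFS =====

-- min of two "possibly infinite" minima (`none` = float('inf')).
def mO : Option Int → Option Int → Option Int
  | none, b => b
  | some a, none => some a
  | some a, some b => some (min a b)

-- A's inner-loop body for a fixed positions list (literally the port's lambda).
def innerf (positions : List Int) (md : Option Int) (i : Int) : Option Int :=
  let distance := (PySem.List.pyGet? positions i).getD 0 -
                  (PySem.List.pyGet? positions (i - 1)).getD 0
  some (match md with | none => distance | some m => min m distance)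

-- the minimum gap contributed by one positions list (A's inner loop from scratch)
def g (ps : List Int) : Option Int :=
  (PySem.List.pyRange 1 (ps.length : Int)).foldl (innerf ps) none

-- A's outer phase-2 loop folded over a values list
def V (vs : List (List Int)) : Option Int :=
  vs.foldl (fun md ps => mO md (g ps)) none

-- the phase-1 grouping dict (literally the port's fold)
def gdict (xs : List String) : PySem.Dict String (List Int) :=
  (PySem.List.enumerate xs).foldl
    (fun d p => d.modify p.2 [] (· ++ [p.1])) PySem.Dict.empty

-- B's fold state (literally the port's fold)
def bst (xs : List String) : PySem.Dict String Int × Option Int :=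
  (PySem.List.enumerate xs).foldl
    (fun (st : PySem.Dict String Int × Option Int) p =>
      let best :=
        match st.1.get? p.2 with
        | some j =>
          let gap := p.1 - j
          some (match st.2 with | none => gap | some b => if gap < b then gap else b)
        | none => st.2
      (st.1.insert p.2 p.1, best))
    (PySem.Dict.empty, none)

theorem mO_none_right (a : Option Int) : mO a none = a := by cases a <;> rfl

theorem mO_assoc (a b c : Option Int) : mO (mO a b) c = mO a (mO b c) := by
  cases a <;> cases b <;> cases c <;> simp [mO, min_assoc]

theorem mO_right_comm (a b c : Option Int) : mO (mO a b) c = mO (mO a c) b := by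
  cases a <;> cases b <;> cases c <;> simp [mO, min_comm, min_left_comm]

theorem innerf_eq_mO (ps : List Int) (md : Option Int) (i : Int) :
    innerf ps md i = mO md (some ((PySem.List.pyGet? ps i).getD 0 -
                                  (PySem.List.pyGet? ps (i - 1)).getD 0)) := by
  cases md <;> rfl

theorem foldl_innerf_start (ps : List Int) (l : List Int) (md o : Option Int) :
    l.foldl (innerf ps) (mO md o) = mO md (l.foldl (innerf ps) o) := by
  induction l generalizing o with
  | nil => rfl
  | cons x t ih =>
      simp only [List.foldl_cons, innerf_eq_mO, mO_assoc]
      exact ih _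

theorem foldl_V_start (l : List (List Int)) (S x : Option Int) :
    l.foldl (fun md ps => mO md (g ps)) (mO S x) =
      mO (l.foldl (fun md ps => mO md (g ps)) S) x := by
  induction l generalizing S with
  | nil => rfl
  | cons q t ih => rw [List.foldl_cons, mO_right_comm]; exact ih _

theorem g_singleton (x : Int) : g [x] = none := by
  simp [g, PySem.List.pyRange_one_eq_nil]

theorem pyGet?_append_lt {ps : List Int} {x i : Int} (h0 : 0 ≤ i) (h : i < (ps.length : Int)) :
    PySem.List.pyGet? (ps ++ [x]) i = PySem.List.pyGet? ps i := by
  rw [PySem.List.pyGet?_of_nonneg _ h0, PySem.List.pyGet?_of_nonneg _ h0,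
    List.getElem?_append_left (by omega)]

theorem g_append (ps : List Int) (x : Int) (h : ps ≠ []) :
    g (ps ++ [x]) = mO (g ps) (some (x - ps.getLast h)) := by
  have hlen : 0 < ps.length := List.length_pos_of_ne_nil h
  have hlen1 : (1 : Int) ≤ (ps.length : Int) := by exact_mod_cast hlen
  have hcast : ((ps ++ [x]).length : Int) = (ps.length : Int) + 1 := by
    simp
  unfold g
  rw [hcast, PySem.List.pyRange_one_succ_right hlen1, List.foldl_append, List.foldl_cons,
    List.foldl_nil]
  have hcongr :
      (PySem.List.pyRange 1 (ps.length : Int)).foldl (innerf (ps ++ [x])) none =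
        (PySem.List.pyRange 1 (ps.length : Int)).foldl (innerf ps) none := by
    apply PySem.List.foldl_congr_mem
    intro acc i hi
    rw [PySem.List.mem_pyRange_one] at hi
    unfold innerf
    rw [pyGet?_append_lt (by omega) (by omega), pyGet?_append_lt (by omega) (by omega)]
  rw [hcongr]
  rw [innerf_eq_mO]
  congr 1
  have h1 : PySem.List.pyGet? (ps ++ [x]) (ps.length : Int) = some x := by
    exact PySem.List.pyGet?_append_length ps [] x
  have h2 : PySem.List.pyGet? (ps ++ [x]) ((ps.length : Int) - 1) = some (ps.getLast h) := by
    rw [pyGet?_append_lt (by omega) (by omega),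
      PySem.List.pyGet?_of_nonneg_of_lt _ (by omega) (by omega)]
    have : ((ps.length : Int) - 1).toNat = ps.length - 1 := by omega
    rw [this, List.getElem?_eq_getElem (by omega), List.getLast_eq_getElem]
  rw [h1, h2]
  rfl

-- phase-2 step equals the abstract mO step
theorem Astep_eq (md : Option Int) (ps : List Int) :
    (if 1 < ps.length then
        (PySem.List.pyRange 1 (ps.length : Int)).foldl (innerf ps) md
      else md) = mO md (g ps) := by
  by_cases hl : 1 < ps.length
  · rw [if_pos hl]
    have := foldl_innerf_start ps (PySem.List.pyRange 1 (ps.length : Int)) md none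
    rwa [mO_none_right] at this
  · rw [if_neg hl]
    have : PySem.List.pyRange 1 (ps.length : Int) = [] :=
      PySem.List.pyRange_one_eq_nil (by omega)
    unfold g
    rw [this, List.foldl_nil, mO_none_right]

-- Python's 'gap if gap < best else best' is min best gap
theorem min_flip (b gap : Int) : (if gap < b then gap else b) = min b gap := by
  rcases lt_or_ge gap b with h | h <;> simp [min_def, *]

-- one right-extension step of both folds
theorem gdict_append (xs : List String) (s : String) :
    gdict (xs ++ [s]) = (gdict xs).modify s [] (· ++ [((xs.length : Int))]) := by
  unfold gdict
  rw [PySem.List.enumerate_append, List.foldl_append, PySem.List.enumerate_cons,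
    PySem.List.enumerate_nil, List.foldl_cons, List.foldl_nil]
  norm_num

theorem bst_append (xs : List String) (s : String) :
    bst (xs ++ [s]) =
      ((bst xs).1.insert s (xs.length : Int),
        match (bst xs).1.get? s with
        | some j =>
          some (match (bst xs).2 with
                | none => (xs.length : Int) - j
                | some b => if (xs.length : Int) - j < b then (xs.length : Int) - j else b)
        | none => (bst xs).2) := by
  unfold bst
  rw [PySem.List.enumerate_append, List.foldl_append, PySem.List.enumerate_cons,
    PySem.List.enumerate_nil, List.foldl_cons, List.foldl_nil]
  norm_num

theorem gdict_nodup_keys (xs : List String) : (gdict xs).keys.Nodup := by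
  unfold gdict
  exact PySem.Dict.nodup_keys_foldl_modify_key _ _ _
    (fun (_ : PySem.Dict String (List Int)) (p : Int × String) v => v ++ [p.1]) _
    (by simp [PySem.Dict.keys_empty])

-- the joint loop invariant, by induction on the input from the right
theorem main_inv (xs : List String) :
    (∀ k, (bst xs).1.get? k = ((gdict xs).getD k []).getLast?) ∧
    (∀ p ∈ (gdict xs).items, p.2 ≠ []) ∧
    (bst xs).2 = V (gdict xs).values := by
  induction xs using List.reverseRecOn with
  | nil =>
      refine ⟨fun k => ?_, fun p hp => ?_, rfl⟩
      · rfl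
      · simp [gdict, PySem.List.enumerate_nil, PySem.Dict.empty] at hp
  | append_singleton xs s ih =>
      obtain ⟨ih1, ih2, ih3⟩ := ih
      have hnd := gdict_nodup_keys xs
      set d := gdict xs with hd
      set n : Int := (xs.length : Int) with hn
      rw [gdict_append, bst_append]
      by_cases hc : d.contains s = true
      · -- s already grouped: one gap is added
        have hsome : (d.get? s).isSome := by rw [← PySem.Dict.contains_eq_isSome_get?]; exact hc
        obtain ⟨ps, hget⟩ := Option.isSome_iff_exists.mp hsome
        have hmem : (s, ps) ∈ d.items := PySem.Dict.mem_items_of_get?_eq_some d hget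
        have hne : ps ≠ [] := ih2 (s, ps) hmem
        have hgetD : d.getD s [] = ps := PySem.Dict.getD_of_get?_eq_some d [] hget
        have hmod : d.modify s [] (· ++ [n]) = d.insert s (ps ++ [n]) := by
          rw [PySem.Dict.modify, hgetD]
        have hlast : (bst xs).1.get? s = some (ps.getLast hne) := by
          rw [ih1 s, hgetD, List.getLast?_eq_some_getLast (h := hne)]
        obtain ⟨l1, l2, hitems⟩ := List.append_of_mem hmem
        have hkeys : d.keys = l1.map Prod.fst ++ s :: l2.map Prod.fst := by
          simp only [PySem.Dict.keys, hitems, List.map_append, List.map_cons]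
        have hnotin : (∀ p ∈ l1, p.1 ≠ s) ∧ (∀ p ∈ l2, p.1 ≠ s) := by
          rw [hkeys, List.nodup_append] at hnd
          obtain ⟨-, h2, hdisj⟩ := hnd
          refine ⟨fun p hp hps => ?_, fun p hp hps => ?_⟩
          · exact hdisj _ (List.mem_map.mpr ⟨p, hp, hps⟩) _ List.mem_cons_self rfl
          · rw [List.nodup_cons] at h2
            exact h2.1 (List.mem_map.mpr ⟨p, hp, hps⟩)
        have hitems' : (d.insert s (ps ++ [n])).items = l1 ++ (s, ps ++ [n]) :: l2 := by
          rw [PySem.Dict.items_insert_of_contains d _ hc, hitems, List.map_append, List.map_cons]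
          congr 1
          · refine (List.map_congr_left fun p hp => ?_).trans (List.map_id l1)
            simp [beq_iff_eq, hnotin.1 p hp]
          · congr 1
            · simp
            · refine (List.map_congr_left fun p hp => ?_).trans (List.map_id l2)
              simp [beq_iff_eq, hnotin.2 p hp]
        have hvals : d.values = l1.map Prod.snd ++ ps :: l2.map Prod.snd := by
          simp only [PySem.Dict.values, hitems, List.map_append, List.map_cons]
        have hvals' : (d.insert s (ps ++ [n])).values =
            l1.map Prod.snd ++ (ps ++ [n]) :: l2.map Prod.snd := by
          simp only [PySem.Dict.values, hitems', List.map_append, List.map_cons]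
        refine ⟨fun k => ?_, fun p hp => ?_, ?_⟩
        · by_cases hk : k = s
          · subst hk
            rw [PySem.Dict.get?_insert_self, hmod, PySem.Dict.getD_insert_self,
              List.getLast?_concat]
          · rw [PySem.Dict.get?_insert_of_ne _ _ hk, hmod,
              PySem.Dict.getD_insert_of_ne _ _ _ hk, ih1 k]
        · rw [hmod, hitems'] at hp
          rcases List.mem_append.mp hp with hp | hp
          · exact ih2 p (hitems ▸ List.mem_append_left _ hp)
          · rcases List.mem_cons.mp hp with hp | hp
            · subst hp; simp
            · exact ih2 p (hitems ▸ List.mem_append_right _ (List.mem_cons_of_mem _ hp))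
        · have hRHS : V (d.insert s (ps ++ [n])).values =
              mO (V d.values) (some (n - ps.getLast hne)) := by
            rw [hvals', hvals]
            unfold V
            rw [List.foldl_append, List.foldl_append, List.foldl_cons, List.foldl_cons]
            rw [g_append ps n hne, ← mO_assoc]
            exact foldl_V_start _ _ _
          rw [hmod, hRHS, ← ih3]
          simp only [hlast]
          cases (bst xs).2 with
          | none => rfl
          | some b => rw [hn]; simp only [mO, min_flip]
      · -- new language: no gap added
        have hcf : d.contains s = false := by simpa using hc
        have hgetD : d.getD s [] = [] := PySem.Dict.getD_of_not_contains d [] hcf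
        have hmod : d.modify s [] (· ++ [n]) = d.insert s [n] := by
          rw [PySem.Dict.modify, hgetD]; rfl
        have hget : (bst xs).1.get? s = none := by
          rw [ih1 s, hgetD]; rfl
        have hitems' : (d.insert s [n]).items = d.items ++ [(s, [n])] :=
          PySem.Dict.items_insert_of_not_contains d _ hcf
        refine ⟨fun k => ?_, fun p hp => ?_, ?_⟩
        · by_cases hk : k = s
          · subst hk
            rw [PySem.Dict.get?_insert_self, hmod, PySem.Dict.getD_insert_self]
            rfl
          · rw [PySem.Dict.get?_insert_of_ne _ _ hk, hmod,
              PySem.Dict.getD_insert_of_ne _ _ _ hk, ih1 k]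
        · rw [hmod, hitems'] at hp
          rcases List.mem_append.mp hp with hp | hp
          · exact ih2 p hp
          · rcases List.mem_cons.mp hp with hp | hp
            · subst hp; simp
            · simp at hp
        · rw [hget, hmod]
          have : (d.insert s [n]).values = d.values ++ [[n]] := by
            simp only [PySem.Dict.values, hitems', List.map_append, List.map_cons, List.map_nil]
          rw [this]
          unfold V
          rw [List.foldl_append, List.foldl_cons, List.foldl_nil, g_singleton, mO_none_right]
          exact ih3

-- ===== VERDICT (by name: the statement is the Claim_ definition above) =====
theorem find_awkwardness_spec : Claim_equal_find_awkwardness := by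
  intro xs _
  unfold Spec_find_awkwardness find_awkwardness find_awkwardness_alt
  have key : ∀ o o' : Option Int, o = o' →
      (match o with | some m => m | none => ((xs.length : Nat) : Int)) =
        (match o' with | some m => m | none => ((xs.length : Nat) : Int)) :=
    fun o o' h => by rw [h]
  apply key
  have hv : (bst xs).2 = V (gdict xs).values := (main_inv xs).2.2
  refine Eq.trans ?_ hv.symm
  unfold V
  exact PySem.List.foldl_congr_mem _ _ _ _ (fun acc ps _ => Astep_eq acc ps)
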